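-- pv_equiv track=rewrite | github.com/Undis-art/crackfree_walls | main.py | find_matching_rows
-- ===== SOURCE A (Python) =====
-- def find_matching_rows(all_rows):
--     """
--     Per each row, list indices of rows that can be placed next to it.
--
--     VALUE
--     list of lists. List at index i holds indices of the rows that can
--     be placed next to row i.
--     """
--     matching_rows = []
--
--     for i in range(len(all_rows)):
--         matches_for_i = []
--         for j in range(len(all_rows)):
--             intersection = [r for r in all_rows[i] if r in all_rows[j]]
--             if not intersection:
--                 # No common locations of tile ends! Ok to place next to
--                 # each other.
--                 matches_for_i.append(j)
--         matching_rows.append(matches_for_i)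
--
--     return matching_rows
-- ===== SOURCE B (Python) =====
-- def find_matching_rows(all_rows):
--     """
--     Per each row, list indices of rows that can be placed next to it.
--
--     VALUE
--     list of lists. List at index i holds indices of the rows that can
--     be placed next to row i.
--     """
--     # Inverted index: location value -> set of row indices containing it.
--     index = {}
--     for j, row in enumerate(all_rows):
--         for loc in row:
--             index.setdefault(loc, set()).add(j)
--
--     result = []
--     for row in all_rows:
--         conflicts = set()
--         for loc in row:
--             conflicts |= index.get(loc, set())
--         result.append([j for j in range(len(all_rows)) if j not in conflicts])
--     return result
-- ===== Notes on version B (the rewrite author's own statement) =====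
-- stated objective: faster
-- what changed: Replaced the all-pairs quadratic scan (for each pair (i,j) intersect row i with row j by membership tests) with an inverted index mapping each location to the set of rows containing it, built in one pass; each row's conflict set is then the union of its locations' index entries and matches are the complement.
import Mathlib
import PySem

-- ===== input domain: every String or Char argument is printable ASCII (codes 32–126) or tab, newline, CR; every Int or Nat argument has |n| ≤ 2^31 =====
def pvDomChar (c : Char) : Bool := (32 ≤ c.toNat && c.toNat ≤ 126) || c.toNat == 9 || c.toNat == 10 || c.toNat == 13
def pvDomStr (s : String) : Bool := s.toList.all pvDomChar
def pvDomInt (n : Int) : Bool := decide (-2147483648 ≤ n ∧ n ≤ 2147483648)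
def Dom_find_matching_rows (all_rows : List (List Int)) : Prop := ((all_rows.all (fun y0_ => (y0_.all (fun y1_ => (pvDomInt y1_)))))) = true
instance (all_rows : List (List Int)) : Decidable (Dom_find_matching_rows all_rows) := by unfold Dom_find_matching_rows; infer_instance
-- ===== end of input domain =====

-- B replaces A's all-pairs membership scans by an inverted index (location -> set of row
-- indices) built in one pass; each row's matches are the complement of its conflict set.


-- ===== PORT A =====
def find_matching_rows (all_rows : List (List Int)) : List (List Int) :=
  (PySem.List.pyRange 0 (PySem.List.len all_rows)).foldl (fun matching_rows i =>
    matching_rows ++ [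
      (PySem.List.pyRange 0 (PySem.List.len all_rows)).foldl (fun matches_for_i j =>
        let intersection := (PySem.List.pyGetD all_rows i []).filter
          (fun r => decide (r ∈ PySem.List.pyGetD all_rows j []))
        if intersection.isEmpty then matches_for_i ++ [j] else matches_for_i) []
    ]) []

-- ===== PORT B =====
-- index.setdefault(loc, set()).add(j)  ==  index[loc] = index.get(loc, set()) with j added
def fmrIndex (all_rows : List (List Int)) : PySem.Dict Int (PySem.Set Int) :=
  (PySem.List.enumerate all_rows).foldl
    (fun index p =>
      p.2.foldl (fun index loc =>
        index.modify loc [] (fun s => PySem.Set.add s p.1)) index)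
    PySem.Dict.empty

def fmrConflicts (index : PySem.Dict Int (PySem.Set Int)) (row : List Int) : PySem.Set Int :=
  row.foldl (fun conflicts loc => conflicts.union (index.getD loc [])) []

def find_matching_rows_alt (all_rows : List (List Int)) : List (List Int) :=
  let index := fmrIndex all_rows
  all_rows.map (fun row =>
    let conflicts := fmrConflicts index row
    (PySem.List.pyRange 0 (PySem.List.len all_rows)).filter
      (fun j => !(conflicts.contains j)))

-- ===== PRECONDITION & SPEC =====
def Spec_find_matching_rows (all_rows : List (List Int)) (out : List (List Int)) : Prop := out = find_matching_rows_alt all_rows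
instance (all_rows : List (List Int)) (out : List (List Int)) : Decidable (Spec_find_matching_rows all_rows out) := by unfold Spec_find_matching_rows; infer_instance

-- ===== CLAIM (what is proved, stated in full; the proofs are below) =====
def Claim_equal_find_matching_rows : Prop := ∀ (all_rows : List (List Int)), Dom_find_matching_rows all_rows → Spec_find_matching_rows all_rows (find_matching_rows all_rows)

-- ===== LEMMAS AND PROOFS =====

-- a map over a list is a map over range(len) with indexing
theorem fmr_map_pyRange (rows : List (List Int)) {g : List Int → List Int} :
    rows.map g = (PySem.List.pyRange 0 (PySem.List.len rows)).map
      (fun i => g (PySem.List.pyGetD rows i [])) := by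
  conv_lhs => rw [← PySem.List.map_pyGetD_pyRange_zero rows []]
  rw [List.map_map]
  rfl

-- one row's pass of the index-building loop
theorem fmr_inner_mem (row : List Int) (v : Int) (d : PySem.Dict Int (PySem.Set Int))
    (loc j : Int) :
    j ∈ (row.foldl (fun d l => d.modify l [] (fun s => PySem.Set.add s v)) d).getD loc []
      ↔ j ∈ d.getD loc [] ∨ (loc ∈ row ∧ j = v) := by
  induction row generalizing d with
  | nil => simp
  | cons l row ih =>
    simp only [List.foldl_cons, ih]
    by_cases h : loc = l
    · subst h
      rw [PySem.Dict.getD_modify_self]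
      simp [PySem.Set.mem_add]
      tauto
    · rw [PySem.Dict.getD_modify_of_ne _ _ _ h]
      constructor
      · rintro (h1 | h1)
        · exact Or.inl h1
        · exact Or.inr ⟨List.mem_cons_of_mem _ h1.1, h1.2⟩
      · rintro (h1 | ⟨hm, hj⟩)
        · exact Or.inl h1
        · rcases List.mem_cons.mp hm with h2 | h2
          · exact absurd h2 h
          · exact Or.inr ⟨h2, hj⟩

-- membership in the finished inverted index
theorem fmr_index_fold_mem (rows : List (List Int)) (s : Int)
    (d : PySem.Dict Int (PySem.Set Int)) (loc j : Int) :
    j ∈ ((PySem.List.enumerate rows s).foldl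
          (fun index p => p.2.foldl (fun index l =>
            index.modify l [] (fun t => PySem.Set.add t p.1)) index) d).getD loc []
      ↔ j ∈ d.getD loc [] ∨
          ∃ k : Nat, k < rows.length ∧ loc ∈ rows.getD k [] ∧ j = s + k := by
  induction rows generalizing s d with
  | nil => simp [PySem.List.enumerate_nil]
  | cons r rows ih =>
    rw [PySem.List.enumerate_cons]
    simp only [List.foldl_cons, ih, fmr_inner_mem]
    constructor
    · rintro ((h1 | ⟨hm, hj⟩) | ⟨k, hk, hm, hj⟩)
      · exact Or.inl h1
      · refine Or.inr ⟨0, by simp, by simpa using hm, ?_⟩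
        push_cast
        omega
      · refine Or.inr ⟨k + 1, ?_, by simpa using hm, ?_⟩
        · simp only [List.length_cons]
          omega
        · push_cast at hj ⊢
          omega
    · rintro (h1 | ⟨k, hk, hm, hj⟩)
      · exact Or.inl (Or.inl h1)
      · cases k with
        | zero =>
          refine Or.inl (Or.inr ⟨by simpa using hm, ?_⟩)
          push_cast at hj
          omega
        | succ k =>
          refine Or.inr ⟨k, ?_, by simpa using hm, ?_⟩
          · simp only [List.length_cons] at hk
            omega
          · push_cast at hj ⊢
            omega

theorem fmr_index_mem (rows : List (List Int)) (loc j : Int) :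
    j ∈ (fmrIndex rows).getD loc []
      ↔ ∃ k : Nat, k < rows.length ∧ loc ∈ rows.getD k [] ∧ j = (k : Int) := by
  unfold fmrIndex
  rw [fmr_index_fold_mem]
  simp [PySem.Dict.empty, PySem.Dict.getD, PySem.Dict.get?]

theorem fmr_conflicts_fold_mem (index : PySem.Dict Int (PySem.Set Int)) (row : List Int)
    (s0 : PySem.Set Int) (j : Int) :
    j ∈ row.foldl (fun conflicts loc => conflicts.union (index.getD loc [])) s0
      ↔ j ∈ s0 ∨ ∃ loc ∈ row, j ∈ index.getD loc [] := by
  induction row generalizing s0 with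
  | nil => simp
  | cons l row ih =>
    simp only [List.foldl_cons, ih, PySem.Set.mem_union]
    constructor
    · rintro ((h | h) | ⟨loc, hm, h⟩)
      · exact Or.inl h
      · exact Or.inr ⟨l, List.mem_cons_self, h⟩
      · exact Or.inr ⟨loc, List.mem_cons_of_mem _ hm, h⟩
    · rintro (h | ⟨loc, hm, h⟩)
      · exact Or.inl (Or.inl h)
      · rcases List.mem_cons.mp hm with rfl | h2
        · exact Or.inl (Or.inr h)
        · exact Or.inr ⟨loc, h2, h⟩

theorem fmr_conflicts_mem (rows : List (List Int)) (row : List Int) (j : Int) :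
    j ∈ fmrConflicts (fmrIndex rows) row
      ↔ ∃ loc ∈ row, ∃ k : Nat, k < rows.length ∧ loc ∈ rows.getD k [] ∧ j = (k : Int) := by
  unfold fmrConflicts
  rw [fmr_conflicts_fold_mem]
  simp only [fmr_index_mem]
  simp

-- the two per-pair conditions agree on every j in range(len(rows))
theorem fmr_cond_eq (rows : List (List Int)) (row : List Int) (j : Int)
    (hj : 0 ≤ j) (hj2 : j < (rows.length : Int)) :
    ((row.filter (fun r => decide (r ∈ PySem.List.pyGetD rows j []))).isEmpty
      = !((fmrConflicts (fmrIndex rows) row).contains j)) := by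
  rw [PySem.List.pyGetD_eq_getElem rows [] hj (by exact_mod_cast hj2)]
  by_cases h : j ∈ fmrConflicts (fmrIndex rows) row
  · rw [(PySem.Set.contains_iff _ _).mpr h]
    obtain ⟨loc, hloc, k, hk, hm, rfl⟩ := (fmr_conflicts_mem rows row j).mp h
    have hmem : loc ∈ row.filter
        (fun r => decide (r ∈ rows[((k : Int)).toNat])) := by
      refine List.mem_filter.mpr ⟨hloc, ?_⟩
      simp only [Int.toNat_natCast, decide_eq_true_eq]
      rwa [List.getD_eq_getElem _ _ hk] at hm
    simp only [Bool.not_true, List.isEmpty_eq_false_iff]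
    exact List.ne_nil_of_mem hmem
  · have hc : (fmrConflicts (fmrIndex rows) row).contains j = false :=
      by
      rcases Bool.eq_false_or_eq_true ((fmrConflicts (fmrIndex rows) row).contains j) with hb | hb
      · exact absurd ((PySem.Set.contains_iff _ _).mp hb) h
      · exact hb
    rw [hc]
    simp only [Bool.not_false, List.isEmpty_iff, List.filter_eq_nil_iff, decide_eq_true_eq]
    intro r hr hmem
    apply h
    refine (fmr_conflicts_mem rows row j).mpr ⟨r, hr, j.toNat, by omega, ?_, by omega⟩
    rwa [List.getD_eq_getElem _ _ (by omega)]

-- ===== VERDICT (by name: the statement is the Claim_ definition above) =====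
theorem find_matching_rows_spec : Claim_equal_find_matching_rows := by
  intro all_rows _
  unfold Spec_find_matching_rows find_matching_rows find_matching_rows_alt
  rw [PySem.List.foldl_append_singleton_eq_map]
  rw [fmr_map_pyRange all_rows, List.nil_append]
  apply List.map_congr_left
  intro i hi
  rw [PySem.List.mem_pyRange_one] at hi
  rw [PySem.List.foldl_append_if (fun j =>
      ((PySem.List.pyGetD all_rows i []).filter
        (fun r => decide (r ∈ PySem.List.pyGetD all_rows j []))).isEmpty) (fun j => j)]
  rw [List.nil_append, List.map_id']
  apply List.filter_congr
  intro j hj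
  rw [PySem.List.mem_pyRange_one] at hj
  exact fmr_cond_eq all_rows (PySem.List.pyGetD all_rows i []) j hj.1
    (by simpa [PySem.List.len] using hj.2)
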